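-- pv_equiv track=rewrite | github.com/pviafore/AdventOfCode2019 | challenge22.py | get_additive_and_factor
-- ===== SOURCE A (Python) =====
-- from typing import List, Tuple
--
-- def get_additive_and_factor(instructions: List[str], num_cards: int) -> Tuple[int, int]:
--     total = 0
--     multiplication = 1
--     for instruction in instructions:
--         if instruction == "deal into new stack":
--             multiplication *= -1
--             total = -total + (num_cards - 1)
--         elif instruction.startswith("cut"):
--             _, num = instruction.split(' ')
--             total -= int(num)
--         elif instruction.startswith("deal"):
--             *_words, num = instruction.split(' ')
--             total *= int(num)
--             multiplication *= int(num)
--         else: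
--             raise RuntimeError("Unknown instruction")
--     return multiplication, total
-- ===== SOURCE B (Python) =====
-- from typing import List, Tuple
--
-- def _affine(instruction: str, num_cards: int) -> Tuple[int, int]:
--     if instruction == "deal into new stack":
--         return (-1, num_cards - 1)
--     if instruction.startswith("cut"):
--         _, num = instruction.split(' ')
--         return (1, -int(num))
--     if instruction.startswith("deal"):
--         *_words, num = instruction.split(' ')
--         return (int(num), 0)
--     raise RuntimeError("Unknown instruction")
--
-- def get_additive_and_factor(instructions: List[str], num_cards: int) -> Tuple[int, int]:
--     # Non-compositional formula: M = prod(a_i), T = sum(b_i * prod_{j>i} a_j).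
--     pairs = [_affine(i, num_cards) for i in instructions]
--     suf = [1] * (len(pairs) + 1)          # suf[i] = product of a_j for j >= i
--     for i in range(len(pairs) - 1, -1, -1):
--         suf[i] = pairs[i][0] * suf[i + 1]
--     total = sum(b * suf[i + 1] for i, (_a, b) in enumerate(pairs))
--     return suf[0], total
-- ===== Notes on version B (the rewrite author's own statement) =====
-- stated objective: alternative
-- what changed: B replaces A's inline affine composition with a non-compositional formula: it maps each instruction to a pair (a,b), builds the suffix products of the a's in a reverse pass, and returns (full product, sum of b_i times the suffix product after i); A updates (multiplication, total) compositionally branch by branch in one forward pass.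
import Mathlib
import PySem

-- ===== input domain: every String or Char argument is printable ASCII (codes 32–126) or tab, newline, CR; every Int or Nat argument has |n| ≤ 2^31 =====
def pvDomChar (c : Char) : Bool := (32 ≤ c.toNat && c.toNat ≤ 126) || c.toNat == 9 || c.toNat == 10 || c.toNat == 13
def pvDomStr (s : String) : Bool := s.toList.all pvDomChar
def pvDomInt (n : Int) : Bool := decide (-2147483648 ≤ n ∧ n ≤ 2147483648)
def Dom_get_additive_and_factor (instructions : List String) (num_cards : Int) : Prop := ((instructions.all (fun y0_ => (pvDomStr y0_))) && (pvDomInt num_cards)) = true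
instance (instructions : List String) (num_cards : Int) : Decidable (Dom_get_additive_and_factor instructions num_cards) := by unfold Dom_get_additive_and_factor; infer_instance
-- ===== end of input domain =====

-- B computes the answer by a non-compositional formula (suffix products of the multipliers
-- plus a weighted sum of the offsets) instead of A's affine-composition loop; objective:
-- alternative algorithm, same cost.

-- ===== PORT A =====
-- A's loop state is (total, multiplication); the pair (multiplication, total) is returned.
-- Where Python raises (unknown instruction, bad token count for cut, unparsable int) the
-- port keeps the state unchanged; such inputs are excluded by Pre_ below.
def get_additive_and_factor (instructions : List String) (num_cards : Int) : Int × Int :=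
  let st := instructions.foldl (fun (p : Int × Int) instr =>
    if instr = "deal into new stack" then
      (-p.1 + (num_cards - 1), p.2 * (-1))
    else if PySem.Str.startswith instr "cut" then
      match (PySem.Str.split? instr " ").getD [] with
      | [_, num] =>
        match PySem.Int.ofStr? num with
        | some n => (p.1 - n, p.2)
        | none => p
      | _ => p
    else if PySem.Str.startswith instr "deal" then
      match ((PySem.Str.split? instr " ").getD []).getLast? with
      | some num =>
        match PySem.Int.ofStr? num with
        | some n => (p.1 * n, p.2 * n)
        | none => p
      | none => p
    else p) (0, 1)
  (st.2, st.1)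

-- ===== PORT B =====
-- classifier: instruction ↦ affine pair (a, b); the unreachable raising cases (outside
-- Pre_) return (1, 0)
def pvAffine (instruction : String) (num_cards : Int) : Int × Int :=
  if instruction = "deal into new stack" then (-1, num_cards - 1)
  else if PySem.Str.startswith instruction "cut" then
    -- '_, num = split': exactly two tokens, num is the second (= last) one
    let parts := (PySem.Str.split? instruction " ").getD []
    if parts.length = 2 then (1, -((parts.getLast?.bind PySem.Int.ofStr?).getD 0))
    else (1, 0)
  else if PySem.Str.startswith instruction "deal" then
    -- '*_words, num = split': num is the last token
    let parts := (PySem.Str.split? instruction " ").getD []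
    (((parts.getLast?.bind PySem.Int.ofStr?).getD 1), 0)
  else (1, 0)

-- suffix products of the a's, built back-to-front as Source B's reverse loop does:
-- pvSuf ps = [∏_{j≥0} a_j, ∏_{j≥1} a_j, …, 1]
def pvSuf : List (Int × Int) → List Int
  | [] => [1]
  | p :: rest =>
    let s := pvSuf rest
    (p.1 * s.headI) :: s

def get_additive_and_factor_alt (instructions : List String) (num_cards : Int) : Int × Int :=
  let pairs := instructions.map (fun i => pvAffine i num_cards)
  let suf := pvSuf pairs
  let total := ((pairs.zip suf.tail).map (fun x => x.1.2 * x.2)).sum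
  (suf.headI, total)

-- ===== PRECONDITION & SPEC =====
-- an instruction is admissible iff A's loop handles it without raising
def pvOkInstr (instr : String) : Bool :=
  if instr = "deal into new stack" then true
  else if PySem.Str.startswith instr "cut" then
    ((PySem.Str.split? instr " ").getD []).length = 2
      && (((PySem.Str.split? instr " ").getD []).getLast?.bind PySem.Int.ofStr?).isSome
  else if PySem.Str.startswith instr "deal" then
    (((PySem.Str.split? instr " ").getD []).getLast?.bind PySem.Int.ofStr?).isSome
  else false

-- Pre_ excludes exactly the inputs on which A raises (RuntimeError for an unknown
-- instruction, ValueError for a bad token count of cut or an unparsable number).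
def Pre_get_additive_and_factor (instructions : List String) (_num_cards : Int) : Prop :=
  ∀ instr ∈ instructions, pvOkInstr instr = true

instance (instructions : List String) (num_cards : Int) : Decidable (Pre_get_additive_and_factor instructions num_cards) := by unfold Pre_get_additive_and_factor; infer_instance

def pvWitness_get_additive_and_factor : List String × Int :=
  (["deal into new stack", "cut -42", "deal with increment 7"], 10007)

def Spec_get_additive_and_factor (instructions : List String) (num_cards : Int) (out : Int × Int) : Prop := out = get_additive_and_factor_alt instructions num_cards
instance (instructions : List String) (num_cards : Int) (out : Int × Int) : Decidable (Spec_get_additive_and_factor instructions num_cards out) := by unfold Spec_get_additive_and_factor; infer_instance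

-- ===== CLAIM (what is proved, stated in full; the proofs are below) =====
def Claim_equal_get_additive_and_factor : Prop := ∀ (instructions : List String) (num_cards : Int), Dom_get_additive_and_factor instructions num_cards → Pre_get_additive_and_factor instructions num_cards → Spec_get_additive_and_factor instructions num_cards (get_additive_and_factor instructions num_cards)

-- ===== LEMMAS AND PROOFS =====

-- step 1: under Pre_, A's per-string fold is the pair fold over the classified pairs
theorem pv_fold_strings (num_cards : Int) (instructions : List String)
    (hok : ∀ instr ∈ instructions, pvOkInstr instr = true) (t m : Int) :
    instructions.foldl (fun (p : Int × Int) instr =>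
      if instr = "deal into new stack" then
        (-p.1 + (num_cards - 1), p.2 * (-1))
      else if PySem.Str.startswith instr "cut" then
        match (PySem.Str.split? instr " ").getD [] with
        | [_, num] =>
          match PySem.Int.ofStr? num with
          | some n => (p.1 - n, p.2)
          | none => p
        | _ => p
      else if PySem.Str.startswith instr "deal" then
        match ((PySem.Str.split? instr " ").getD []).getLast? with
        | some num =>
          match PySem.Int.ofStr? num with
          | some n => (p.1 * n, p.2 * n)
          | none => p
        | none => p
      else p) (t, m)
    =
    (instructions.map (fun i => pvAffine i num_cards)).foldl
      (fun (p ab : Int × Int) => (ab.1 * p.1 + ab.2, p.2 * ab.1)) (t, m) := by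
  induction instructions generalizing t m with
  | nil => simp
  | cons instr rest ih =>
    have hi : pvOkInstr instr = true := hok instr (by simp)
    have hrest : ∀ i ∈ rest, pvOkInstr i = true := fun i hi' => hok i (by simp [hi'])
    simp only [List.map_cons, List.foldl_cons]
    unfold pvOkInstr at hi
    by_cases h1 : instr = "deal into new stack"
    · subst h1
      rw [ih hrest]
      simp only [pvAffine, reduceIte]
      ring_nf
    · simp only [if_neg h1] at hi ⊢
      by_cases h2 : PySem.Str.startswith instr "cut" = true
      · simp only [if_pos h2] at hi ⊢
        match hs : (PySem.Str.split? instr " ").getD [] with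
        | [a, num] =>
          simp only [hs] at hi ⊢
          match hn : PySem.Int.ofStr? num with
          | some n =>
            rw [ih hrest]
            simp only [pvAffine, if_neg h1, if_pos h2, hs]
            simp [hn, sub_eq_add_neg]
          | none => simp [hn] at hi
        | [] => simp [hs] at hi
        | [a] => simp [hs] at hi
        | a :: b :: c :: ds => simp [hs] at hi
      · simp only [if_neg h2] at hi ⊢
        by_cases h3 : PySem.Str.startswith instr "deal" = true
        · simp only [if_pos h3] at hi ⊢
          match hs : ((PySem.Str.split? instr " ").getD []).getLast? with
          | some num =>
            simp only [hs] at hi ⊢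
            match hn : PySem.Int.ofStr? num with
            | some n =>
              rw [ih hrest]
              simp only [pvAffine, if_neg h1, if_neg h2, if_pos h3]
              simp [hs, hn, mul_comm]
            | none => simp [hn] at hi
          | none => simp [hs] at hi
        · rw [if_neg h3] at hi
          exact absurd hi (by decide)

-- step 2: the pair fold in closed form via B's suffix products and weighted sum
theorem pv_fold_pairs (ps : List (Int × Int)) (t m : Int) :
    ps.foldl (fun (p ab : Int × Int) => (ab.1 * p.1 + ab.2, p.2 * ab.1)) (t, m)
    =
    ((pvSuf ps).headI * t + ((ps.zip (pvSuf ps).tail).map (fun x => x.1.2 * x.2)).sum,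
     m * (pvSuf ps).headI) := by
  induction ps generalizing t m with
  | nil => simp [pvSuf]
  | cons p rest ih =>
    simp only [List.foldl_cons, pvSuf, List.tail_cons]
    rw [ih]
    have hz : (((p :: rest).zip (pvSuf rest)).map (fun x => x.1.2 * x.2)).sum
        = p.2 * (pvSuf rest).headI + ((rest.zip (pvSuf rest).tail).map (fun x => x.1.2 * x.2)).sum := by
      match hr : pvSuf rest with
      | [] => cases rest <;> simp [pvSuf] at hr
      | h :: tl => simp [List.zip_cons_cons]
    rw [hz]
    simp only [List.headI_cons]
    simp only [Prod.mk.injEq]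
    constructor <;> ring

-- ===== VERDICT (by name: the statement is the Claim_ definition above) =====
theorem get_additive_and_factor_spec : Claim_equal_get_additive_and_factor := by
  intro instructions num_cards _hdom hpre
  unfold Spec_get_additive_and_factor get_additive_and_factor get_additive_and_factor_alt
  simp only
  rw [pv_fold_strings num_cards instructions hpre 0 1, pv_fold_pairs]
  simp
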